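-- pv_equiv track=rewrite | github.com/fuzekun/ML | CV/expriement/202122040114+付泽坤.py | drawRec
-- ===== SOURCE A (Python) =====
-- def drawRec(image, rec, height, width) :
--     (x1, y1) = rec[0]
--     (x2, y2) = rec[1]
--     for x in range(height):
--         for y in range(width) :
--             if ((x == x1 or x == x2) and y >= y1 and y <= y2) or ((y == y2 or y == y1) and x >= x1 and x <= x2):
--                 image[x][y] = 255
--     return image
-- ===== SOURCE B (Python) =====
-- def drawRec(image, rec, height, width):
--     (x1, y1) = rec[0]
--     (x2, y2) = rec[1]
--     ylo, yhi = max(y1, 0), min(y2, width - 1)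
--     xlo, xhi = max(x1, 0), min(x2, height - 1)
--     for x in (x1, x2):
--         if 0 <= x < height:
--             for y in range(ylo, yhi + 1):
--                 image[x][y] = 255
--     for y in (y1, y2):
--         if 0 <= y < width:
--             for x in range(xlo, xhi + 1):
--                 image[x][y] = 255
--     return image
-- ===== Notes on version B (the rewrite author's own statement) =====
-- stated objective: faster
-- what changed: Instead of scanning all height*width pixels and testing each against the outline predicate, B writes only the four clamped edge segments of the rectangle directly.
import Mathlib
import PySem

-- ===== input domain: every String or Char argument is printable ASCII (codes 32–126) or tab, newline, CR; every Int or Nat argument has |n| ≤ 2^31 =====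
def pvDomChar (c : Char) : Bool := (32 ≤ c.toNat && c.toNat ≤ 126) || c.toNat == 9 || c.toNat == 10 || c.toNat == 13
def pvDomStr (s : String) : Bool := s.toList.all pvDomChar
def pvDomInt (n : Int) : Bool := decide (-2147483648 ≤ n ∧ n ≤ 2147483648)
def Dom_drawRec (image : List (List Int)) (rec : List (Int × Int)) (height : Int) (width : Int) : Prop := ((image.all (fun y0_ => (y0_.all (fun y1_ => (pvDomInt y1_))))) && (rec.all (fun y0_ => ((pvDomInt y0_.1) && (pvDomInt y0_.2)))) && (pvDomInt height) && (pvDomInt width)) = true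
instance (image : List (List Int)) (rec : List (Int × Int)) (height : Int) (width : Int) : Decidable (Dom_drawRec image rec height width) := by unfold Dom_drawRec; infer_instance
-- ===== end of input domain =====

-- B draws only the four clamped edge segments instead of scanning every pixel (faster: O(height+width) vs O(height*width)).
-- Both A and B mutate `image` in place in Python; they perform the identical mutation, and the equivalence proved here is about the returned value.

-- ===== PORT A =====
def drawRec (image : List (List Int)) (rec : List (Int × Int)) (height : Int) (width : Int) : List (List Int) :=
  match rec with
  | (x1, y1) :: (x2, y2) :: _ =>
    (PySem.List.pyRange 0 height 1).foldl (fun img x =>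
      (PySem.List.pyRange 0 width 1).foldl (fun img y =>
        if ((x = x1 ∨ x = x2) ∧ y1 ≤ y ∧ y ≤ y2) ∨ ((y = y2 ∨ y = y1) ∧ x1 ≤ x ∧ x ≤ x2)
        then PySem.List.pySetD img x (PySem.List.pySetD (PySem.List.pyGetD img x []) y 255)
        else img) img) image
  | _ => image  -- rec[0]/rec[1] raises here: excluded by Pre_drawRec

-- ===== PORT B =====
-- `image[x][y] = 255` (Python list-assignment semantics; total form, exact under Pre_)
def pvSet (im : List (List Int)) (x y : Int) : List (List Int) :=
  PySem.List.pySetD im x (PySem.List.pySetD (PySem.List.pyGetD im x []) y 255)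

def drawRec_alt (image : List (List Int)) (rec : List (Int × Int)) (height : Int) (width : Int) : List (List Int) :=
  match PySem.List.pyGet? rec 0 with
  | none => image  -- rec[0] raises: excluded by Pre_drawRec
  | some p1 =>
    match PySem.List.pyGet? rec 1 with
    | none => image  -- rec[1] raises: excluded by Pre_drawRec
    | some p2 =>
    let x1 := p1.1
    let y1 := p1.2
    let x2 := p2.1
    let y2 := p2.2
    let ylo := max y1 0
    let yhi := min y2 (width - 1)
    let xlo := max x1 0
    let xhi := min x2 (height - 1)
    let img1 := ([x1, x2] : List Int).foldl (fun img x =>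
      if 0 ≤ x ∧ x < height then
        (PySem.List.pyRange ylo (yhi + 1) 1).foldl (fun img y => pvSet img x y) img
      else img) image
    ([y1, y2] : List Int).foldl (fun img y =>
      if 0 ≤ y ∧ y < width then
        (PySem.List.pyRange xlo (xhi + 1) 1).foldl (fun img x => pvSet img x y) img
      else img) img1

-- ===== PRECONDITION & SPEC =====
-- Pre_ is EXACT: A raises IndexError iff rec has fewer than two points or some outline pixel of the
-- rectangle that falls inside [0,height)×[0,width) lies outside the actual image grid.
def Pre_drawRec (image : List (List Int)) (rec : List (Int × Int)) (height : Int) (width : Int) : Prop :=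
  2 ≤ rec.length ∧
  (∀ x ∈ ([(rec.getD 0 (0,0)).1, (rec.getD 1 (0,0)).1] : List Int), 0 ≤ x → x < height →
    ∀ y ∈ PySem.List.pyRange (max (rec.getD 0 (0,0)).2 0) (min (rec.getD 1 (0,0)).2 (width - 1) + 1) 1,
      x < (image.length : Int) ∧ y < ((image.getD x.toNat []).length : Int)) ∧
  (∀ y ∈ ([(rec.getD 0 (0,0)).2, (rec.getD 1 (0,0)).2] : List Int), 0 ≤ y → y < width →
    ∀ x ∈ PySem.List.pyRange (max (rec.getD 0 (0,0)).1 0) (min (rec.getD 1 (0,0)).1 (height - 1) + 1) 1,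
      x < (image.length : Int) ∧ y < ((image.getD x.toNat []).length : Int))
instance (image : List (List Int)) (rec : List (Int × Int)) (height : Int) (width : Int) : Decidable (Pre_drawRec image rec height width) := by unfold Pre_drawRec; infer_instance

def pvWitness_drawRec : List (List Int) × (List (Int × Int)) × Int × Int :=
  ([[0, 0], [0, 0]], [(0, 0), (1, 1)], 2, 2)

def Spec_drawRec (image : List (List Int)) (rec : List (Int × Int)) (height : Int) (width : Int) (out : List (List Int)) : Prop := out = drawRec_alt image rec height width
instance (image : List (List Int)) (rec : List (Int × Int)) (height : Int) (width : Int) (out : List (List Int)) : Decidable (Spec_drawRec image rec height width out) := by unfold Spec_drawRec; infer_instance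

-- ===== CLAIM (what is proved, stated in full; the proofs are below) =====
def Claim_equal_drawRec : Prop := ∀ (image : List (List Int)) (rec : List (Int × Int)) (height : Int) (width : Int), Dom_drawRec image rec height width → Pre_drawRec image rec height width → Spec_drawRec image rec height width (drawRec image rec height width)

-- ===== LEMMAS AND PROOFS =====

-- normal form: a sequence of writes of 255 at integer pixel coordinates
def pvWrites (l : List (Int × Int)) (im : List (List Int)) : List (List Int) :=
  l.foldl (fun im p => pvSet im p.1 p.2) im

lemma pvSet_nonneg (im : List (List Int)) (x y : Int) (hx : 0 ≤ x) (hy : 0 ≤ y) :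
    pvSet im x y = im.set x.toNat ((im.getD x.toNat []).set y.toNat 255) := by
  simp [pvSet, PySem.List.pySetD_of_nonneg _ _ hx, PySem.List.pySetD_of_nonneg _ _ hy,
    PySem.List.pyGetD_of_nonneg _ _ hx]

lemma getD_set_row (im : List (List Int)) (i : Nat) (r : List Int) (k : Nat) :
    ((im.set i r).getD k []) = if k = i ∧ i < im.length then r else im.getD k [] := by
  simp only [List.getD_eq_getElem?_getD, List.getElem?_set]
  by_cases h : k = i
  · subst h
    by_cases hl : k < im.length
    · simp [hl]
    · simp [hl]
  · simp [h, Ne.symm h]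

lemma length_pvWrites (l : List (Int × Int)) (im : List (List Int)) :
    (pvWrites l im).length = im.length := by
  induction l generalizing im with
  | nil => rfl
  | cons p t ih =>
    simp only [pvWrites, List.foldl_cons] at ih ⊢
    rw [ih, pvSet, PySem.List.length_pySetD]

lemma rowlen_pvSet (im : List (List Int)) (x y : Int) (hx : 0 ≤ x) (hy : 0 ≤ y) (k : Nat) :
    ((pvSet im x y).getD k []).length = (im.getD k []).length := by
  rw [pvSet_nonneg im x y hx hy, getD_set_row]
  split
  · rename_i h; rw [h.1]; simp
  · rfl

lemma rowlen_pvWrites (l : List (Int × Int)) (im : List (List Int))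
    (hl : ∀ p ∈ l, 0 ≤ p.1 ∧ 0 ≤ p.2) (k : Nat) :
    ((pvWrites l im).getD k []).length = (im.getD k []).length := by
  induction l generalizing im with
  | nil => rfl
  | cons p t ih =>
    have hp := hl p (List.mem_cons_self)
    have := ih (pvSet im p.1 p.2) (fun q hq => hl q (List.mem_cons_of_mem _ hq)) 
    simp only [pvWrites, List.foldl_cons] at this ⊢
    rw [this, rowlen_pvSet im p.1 p.2 hp.1 hp.2]

lemma g_pvWrites (l : List (Int × Int)) (im : List (List Int))
    (hl : ∀ p ∈ l, 0 ≤ p.1 ∧ 0 ≤ p.2) (k j : Nat)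
    (hk : k < im.length) (hj : j < (im.getD k []).length) :
    ((pvWrites l im).getD k []).getD j 0 =
      if ((k : Int), (j : Int)) ∈ l then 255 else (im.getD k []).getD j 0 := by
  induction l generalizing im with
  | nil => simp [pvWrites]
  | cons p t ih =>
    have hp := hl p (List.mem_cons_self)
    have ht : ∀ q ∈ t, 0 ≤ q.1 ∧ 0 ≤ q.2 := fun q hq => hl q (List.mem_cons_of_mem _ hq)
    have hk' : k < (pvSet im p.1 p.2).length := by
      rwa [pvSet_nonneg im p.1 p.2 hp.1 hp.2, List.length_set]
    have hj' : j < ((pvSet im p.1 p.2).getD k []).length := by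
      rwa [rowlen_pvSet im p.1 p.2 hp.1 hp.2]
    have := ih (pvSet im p.1 p.2) ht hk' hj'
    simp only [pvWrites, List.foldl_cons] at this ⊢
    rw [this]
    by_cases hmem : ((k : Int), (j : Int)) ∈ t
    · simp [hmem]
    · simp only [hmem, if_false, List.mem_cons, or_false]
      rw [pvSet_nonneg im p.1 p.2 hp.1 hp.2, getD_set_row]
      by_cases hkp : (k : Int) = p.1
      · have hk2 : k = p.1.toNat := by omega
        rw [if_pos ⟨hk2, by omega⟩, ← hk2]
        by_cases hjp : (j : Int) = p.2
        · have hj2 : j = p.2.toNat := by omega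
          have hpe : ((k : Int), (j : Int)) = p := by
            obtain ⟨a, b⟩ := p; simp only [Prod.mk.injEq]; exact ⟨hkp, hjp⟩
          rw [if_pos hpe, List.getD_eq_getElem?_getD, List.getElem?_set, if_pos hj2.symm,
            if_pos (by omega : p.2.toNat < (im.getD k []).length)]
          rfl
        · have hne : ¬ ((k : Int), (j : Int)) = p := fun h => hjp (congrArg Prod.snd h)
          rw [if_neg hne, List.getD_eq_getElem?_getD, List.getD_eq_getElem?_getD,
            List.getElem?_set, if_neg (by omega : ¬ p.2.toNat = j)]
          rfl
      · have hne : ¬ ((k : Int), (j : Int)) = p := fun h => hkp (congrArg Prod.fst h)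
        have hne2 : ¬ (k = p.1.toNat ∧ p.1.toNat < im.length) := by
          intro h
          exact hkp (by omega)
        rw [if_neg hne2, if_neg hne]

lemma pvWrites_ext (l1 l2 : List (Int × Int)) (im : List (List Int))
    (h1 : ∀ p ∈ l1, 0 ≤ p.1 ∧ 0 ≤ p.2) (h2 : ∀ p ∈ l2, 0 ≤ p.1 ∧ 0 ≤ p.2)
    (hmem : ∀ p, p ∈ l1 ↔ p ∈ l2) :
    pvWrites l1 im = pvWrites l2 im := by
  apply List.ext_getElem
  · rw [length_pvWrites, length_pvWrites]
  · intro k hk1 hk2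
    have hk : k < im.length := by rwa [length_pvWrites] at hk1
    apply List.ext_getElem
    · have a1 := rowlen_pvWrites l1 im h1 k
      have a2 := rowlen_pvWrites l2 im h2 k
      simp only [List.getD_eq_getElem?_getD, List.getElem?_eq_getElem hk1, Option.getD_some] at a1
      simp only [List.getD_eq_getElem?_getD, List.getElem?_eq_getElem hk2, Option.getD_some] at a2
      rw [a1, a2]
    · intro j hj1 hj2
      have hrl : ((pvWrites l1 im).getD k []) = (pvWrites l1 im)[k] := by
        rw [List.getD_eq_getElem?_getD, List.getElem?_eq_getElem hk1]; rfl
      have hrl2 : ((pvWrites l2 im).getD k []) = (pvWrites l2 im)[k] := by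
        rw [List.getD_eq_getElem?_getD, List.getElem?_eq_getElem hk2]; rfl
      have hj : j < (im.getD k []).length := by
        have := rowlen_pvWrites l1 im h1 k
        rw [hrl] at this; omega
      have g1 := g_pvWrites l1 im h1 k j hk hj
      have g2 := g_pvWrites l2 im h2 k j hk hj
      rw [hrl] at g1; rw [hrl2] at g2
      simp only [List.getD_eq_getElem?_getD, List.getElem?_eq_getElem hj1, Option.getD_some] at g1
      simp only [List.getD_eq_getElem?_getD, List.getElem?_eq_getElem hj2, Option.getD_some] at g2
      rw [g1, g2]
      simp only [hmem]

lemma foldl_if_pvSet (P : Int → Int → Prop) [inst : ∀ x y, Decidable (P x y)]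
    (x : Int) (ys : List Int) (im : List (List Int)) :
    ys.foldl (fun im y => if P x y then pvSet im x y else im) im =
      pvWrites ((ys.filter (fun y => decide (P x y))).map (fun y => (x, y))) im := by
  induction ys generalizing im with
  | nil => rfl
  | cons y t ih =>
    by_cases h : P x y <;> simp [h, pvWrites, List.foldl_cons, ih]

lemma foldl_pvSet_map (x : Int) (ys : List Int) (im : List (List Int)) :
    ys.foldl (fun im y => pvSet im x y) im = pvWrites (ys.map (fun y => (x, y))) im := by
  induction ys generalizing im with
  | nil => rfl
  | cons y t ih => simp [pvWrites, List.foldl_cons, ih]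

lemma foldl_pvSet_map' (y : Int) (xs : List Int) (im : List (List Int)) :
    xs.foldl (fun im x => pvSet im x y) im = pvWrites (xs.map (fun x => (x, y))) im := by
  induction xs generalizing im with
  | nil => rfl
  | cons x t ih => simp [pvWrites, List.foldl_cons, ih]

lemma foldl_pvWrites_flatMap (f : Int → List (Int × Int)) (xs : List Int) (im : List (List Int)) :
    xs.foldl (fun im x => pvWrites (f x) im) im = pvWrites (xs.flatMap f) im := by
  induction xs generalizing im with
  | nil => rfl
  | cons x t ih => simp only [List.foldl_cons, List.flatMap_cons, pvWrites, List.foldl_append]; exact ih _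

lemma pvWrites_append (l1 l2 : List (Int × Int)) (im : List (List Int)) :
    pvWrites (l1 ++ l2) im = pvWrites l2 (pvWrites l1 im) := by
  simp [pvWrites, List.foldl_append]

lemma pySetD_inline_eq_pvSet (im : List (List Int)) (x y : Int) :
    PySem.List.pySetD im x (PySem.List.pySetD (PySem.List.pyGetD im x []) y 255) = pvSet im x y := rfl

lemma ite_pvWrites (c : Prop) [Decidable c] (l : List (Int × Int)) (im : List (List Int)) :
    (if c then pvWrites l im else im) = pvWrites (if c then l else []) im := by
  split <;> rfl

lemma drawRec_eq_writes (image : List (List Int)) (x1 y1 x2 y2 : Int) (t : List (Int × Int))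
    (height width : Int) :
    drawRec image ((x1, y1) :: (x2, y2) :: t) height width =
      pvWrites ((PySem.List.pyRange 0 height 1).flatMap (fun x =>
        (((PySem.List.pyRange 0 width 1).filter (fun y =>
          decide (((x = x1 ∨ x = x2) ∧ y1 ≤ y ∧ y ≤ y2) ∨ ((y = y2 ∨ y = y1) ∧ x1 ≤ x ∧ x ≤ x2)))).map
          (fun y => (x, y)))) ) image := by
  simp only [drawRec, pySetD_inline_eq_pvSet]
  rw [← foldl_pvWrites_flatMap]
  apply PySem.List.foldl_congr_mem
  intro im x _
  rw [foldl_if_pvSet (fun x y => ((x = x1 ∨ x = x2) ∧ y1 ≤ y ∧ y ≤ y2) ∨ ((y = y2 ∨ y = y1) ∧ x1 ≤ x ∧ x ≤ x2))]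

lemma drawRec_alt_eq_writes (image : List (List Int)) (x1 y1 x2 y2 : Int) (t : List (Int × Int))
    (height width : Int) :
    drawRec_alt image ((x1, y1) :: (x2, y2) :: t) height width =
      pvWrites ((([x1, x2] : List Int).flatMap (fun x =>
          if 0 ≤ x ∧ x < height then
            (PySem.List.pyRange (max y1 0) (min y2 (width - 1) + 1) 1).map (fun y => (x, y))
          else [])) ++
        (([y1, y2] : List Int).flatMap (fun y =>
          if 0 ≤ y ∧ y < width then
            (PySem.List.pyRange (max x1 0) (min x2 (height - 1) + 1) 1).map (fun x => (x, y))
          else []))) image := by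
  have h0 : PySem.List.pyGet? ((x1, y1) :: (x2, y2) :: t) 0 = some (x1, y1) := by
    rw [PySem.List.pyGet?, PySem.List.pyIdx?]
    simp only [le_refl, if_pos, List.length_cons]
    rw [if_pos (by push_cast; omega : (0:Int) < ↑(t.length + 1 + 1))]
    rfl
  have h1 : PySem.List.pyGet? ((x1, y1) :: (x2, y2) :: t) 1 = some (x2, y2) := by
    rw [PySem.List.pyGet?, PySem.List.pyIdx?]
    simp only [List.length_cons]
    rw [if_pos (by omega : (0:Int) ≤ 1), if_pos (by push_cast; omega : (1:Int) < ↑(t.length + 1 + 1))]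
    rfl
  simp only [drawRec_alt, h0, h1]
  rw [pvWrites_append, ← foldl_pvWrites_flatMap, ← foldl_pvWrites_flatMap]
  have inner1 : ∀ (im : List (List Int)),
      ([x1, x2] : List Int).foldl (fun img x =>
        if 0 ≤ x ∧ x < height then
          (PySem.List.pyRange (max y1 0) (min y2 (width - 1) + 1) 1).foldl (fun img y => pvSet img x y) img
        else img) im =
      ([x1, x2] : List Int).foldl (fun img x =>
        pvWrites (if 0 ≤ x ∧ x < height then
          (PySem.List.pyRange (max y1 0) (min y2 (width - 1) + 1) 1).map (fun y => (x, y))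
          else []) img) im := by
    intro im
    apply PySem.List.foldl_congr_mem
    intro im' x _
    rw [foldl_pvSet_map, ite_pvWrites]
  rw [inner1]
  apply PySem.List.foldl_congr_mem
  intro im' y _
  rw [foldl_pvSet_map', ite_pvWrites]

-- ===== VERDICT (by name: the statement is the Claim_ definition above) =====
theorem drawRec_spec : Claim_equal_drawRec := by
  intro image rec height width _ hpre
  unfold Spec_drawRec
  obtain ⟨hlen, -, -⟩ := hpre
  match rec with
  | [] => simp at hlen
  | [_] => simp at hlen
  | (x1, y1) :: (x2, y2) :: t =>
    rw [drawRec_eq_writes, drawRec_alt_eq_writes]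
    apply pvWrites_ext
    · intro p hp
      simp only [List.mem_flatMap, List.mem_map, List.mem_filter, PySem.List.mem_pyRange_one] at hp
      obtain ⟨x, hx, y, ⟨hy, -⟩, hpe⟩ := hp
      rw [← hpe]
      exact ⟨hx.1, hy.1⟩
    · intro p hp
      simp only [List.mem_append, List.mem_flatMap, List.mem_cons, List.mem_ite_nil_right,
        List.mem_map, PySem.List.mem_pyRange_one, List.not_mem_nil, or_false] at hp
      rcases hp with ⟨x, -, hg, y, hy, hpe⟩ | ⟨y, -, hg, x, hx, hpe⟩ <;> rw [← hpe]
      · exact ⟨hg.1, by omega⟩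
      · exact ⟨by omega, hg.1⟩
    · rintro ⟨a, b⟩
      simp only [List.mem_append, List.mem_flatMap, List.mem_cons, List.mem_ite_nil_right,
        List.mem_map, List.mem_filter, PySem.List.mem_pyRange_one, List.not_mem_nil, or_false,
        decide_eq_true_eq, Prod.mk.injEq]
      constructor
      · rintro ⟨x, hx, y, ⟨hy, hc⟩, rfl, rfl⟩
        rcases hc with ⟨hx12, hy12⟩ | ⟨hy12, hx12⟩
        · exact Or.inl ⟨x, by omega, by omega, y, by omega, rfl, rfl⟩
        · exact Or.inr ⟨y, by omega, by omega, x, by omega, rfl, rfl⟩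
      · rintro (⟨x, hxm, hg, y, hy, rfl, rfl⟩ | ⟨y, hym, hg, x, hx, rfl, rfl⟩) <;>
        · refine ⟨_, by omega, _, ⟨by omega, by omega⟩, rfl, rfl⟩
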